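-- pv_equiv track=rewrite | github.com/arjunpkulkarni/congruence | BCONGRUENCE/app/services/note_style.py | prepare_style_context
-- ===== SOURCE A (Python) =====
-- def prepare_style_context(note_text: str, max_chars: int = 2000) -> str:
--     """
--     Prepare note text for use as style context in LLM prompts.
--
--     Args:
--         note_text: Full note text
--         max_chars: Maximum characters to include
--
--     Returns:
--         Truncated note text suitable for prompt context
--     """
--     if len(note_text) <= max_chars:
--         return note_text
--
--     # Try to include complete sections rather than cutting mid-section
--     lines = note_text.split('\n')
--     context = ""
--
--     for line in lines:
--         if len(context + line + '\n') > max_chars: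
--             break
--         context += line + '\n'
--
--     return context.strip()
-- ===== SOURCE B (Python) =====
-- def _bisect_right(a, x):
--     # CPython's bisect.bisect_right, hand-written (A imports no modules)
--     lo, hi = 0, len(a)
--     while lo < hi:
--         mid = (lo + hi) // 2
--         if x < a[mid]:
--             hi = mid
--         else:
--             lo = mid + 1
--     return lo
--
--
-- def prepare_style_context(note_text: str, max_chars: int = 2000) -> str:
--     if len(note_text) <= max_chars:
--         return note_text
--     lines = note_text.split('\n')
--     # prefix-sum table of per-line costs (line length + trailing '\n')
--     cum = []
--     total = 0
--     for line in lines: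
--         total += len(line) + 1
--         cum.append(total)
--     # number of leading lines whose cumulative cost stays within max_chars
--     k = _bisect_right(cum, max_chars)
--     return '\n'.join(lines[:k]).strip()
-- ===== Notes on version B (the rewrite author's own statement) =====
-- stated objective: alternative
-- what changed: Replaces the greedy loop that re-concatenates and re-measures the accumulated context on every iteration with a prefix-sum table of per-line costs plus a binary search (a hand-written bisect_right) for the cut-off line count, followed by a single join of the kept lines.
import Mathlib
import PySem

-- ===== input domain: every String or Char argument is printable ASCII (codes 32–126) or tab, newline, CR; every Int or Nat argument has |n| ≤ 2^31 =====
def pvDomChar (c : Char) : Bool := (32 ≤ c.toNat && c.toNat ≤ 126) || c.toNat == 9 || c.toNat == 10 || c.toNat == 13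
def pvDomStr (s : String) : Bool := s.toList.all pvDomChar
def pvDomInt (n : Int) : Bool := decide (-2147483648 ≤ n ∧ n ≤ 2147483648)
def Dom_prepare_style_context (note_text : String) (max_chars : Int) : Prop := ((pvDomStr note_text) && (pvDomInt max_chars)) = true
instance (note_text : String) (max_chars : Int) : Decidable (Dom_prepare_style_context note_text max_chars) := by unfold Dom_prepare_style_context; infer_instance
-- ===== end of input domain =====

-- B replaces A's greedy string-concatenation loop with a prefix-sum table of line costs
-- plus a binary search (bisect_right) for the cut-off line count (alternative decomposition).


-- ===== PORT A =====
-- A's 'for line in lines: if len(context + line + '\n') > max_chars: break; context += line + '\n''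
def pscLoopA (max_chars : Int) (context : List Char) : List (List Char) → List Char
  | [] => context
  | l :: rest =>
    if PySem.List.len (context ++ l ++ ['\n']) > max_chars then context
    else pscLoopA max_chars (context ++ l ++ ['\n']) rest

def prepare_style_context (note_text : String) (max_chars : Int) : String :=
  if PySem.Str.len note_text ≤ max_chars then note_text
  else
    let lines := PySem.Chars.splitOn note_text.toList ['\n']
    let context := pscLoopA max_chars [] lines
    String.ofList (PySem.Chars.strip context)

-- ===== PORT B =====
-- Source B's loop 'total += len(line) + 1; cum.append(total)'
def pscCumLoop (st : List Int × Int) (line : List Char) : List Int × Int :=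
  let total := st.2 + (PySem.List.len line + 1)
  (st.1 ++ [total], total)

-- Source B's _bisect_right is CPython's bisect_right verbatim; it is ported as the PySem primitive.
def prepare_style_context_alt (note_text : String) (max_chars : Int) : String :=
  if PySem.Str.len note_text ≤ max_chars then note_text
  else
    let lines := PySem.Chars.splitOn note_text.toList ['\n']
    let cum := (lines.foldl pscCumLoop ([], 0)).1
    let k := PySem.List.bisectRight cum max_chars
    String.ofList (PySem.Chars.strip
      (PySem.Chars.join ['\n'] (PySem.List.slice lines none (some (k : Nat)))))

-- ===== PRECONDITION & SPEC =====
def Spec_prepare_style_context (note_text : String) (max_chars : Int) (out : String) : Prop := out = prepare_style_context_alt note_text max_chars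
instance (note_text : String) (max_chars : Int) (out : String) : Decidable (Spec_prepare_style_context note_text max_chars out) := by unfold Spec_prepare_style_context; infer_instance

-- ===== CLAIM (what is proved, stated in full; the proofs are below) =====
def Claim_equal_prepare_style_context : Prop := ∀ (note_text : String) (max_chars : Int), Dom_prepare_style_context note_text max_chars → Spec_prepare_style_context note_text max_chars (prepare_style_context note_text max_chars)

-- ===== LEMMAS AND PROOFS =====

-- A's loop expressed with the remaining budget
def pscGreedy (M : Int) : List (List Char) → List Char
  | [] => []
  | l :: rest =>
    if ((l.length : Int) + 1) > M then []
    else (l ++ ['\n']) ++ pscGreedy (M - ((l.length : Int) + 1)) rest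

-- the prefix-sum list of per-line costs starting from total t
def pscCum (t : Int) : List (List Char) → List Int
  | [] => []
  | l :: rest => (t + ((l.length : Int) + 1)) :: pscCum (t + ((l.length : Int) + 1)) rest

lemma pscLoopA_eq (M : Int) : ∀ (lines : List (List Char)) (ctx : List Char),
    pscLoopA M ctx lines = ctx ++ pscGreedy (M - (ctx.length : Int)) lines := by
  intro lines
  induction lines with
  | nil => intro ctx; simp [pscLoopA, pscGreedy]
  | cons l rest ih =>
    intro ctx
    simp only [pscLoopA, pscGreedy, PySem.List.len_eq, List.length_append,
      List.length_cons, List.length_nil]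
    by_cases h : ((ctx.length : Int) + ((l.length : Int) + 1)) > M
    · rw [if_pos (by push_cast; omega), if_pos (by omega)]
      simp
    · rw [if_neg (by push_cast; omega), if_neg (by omega), ih]
      simp only [List.length_append, List.length_cons, List.length_nil, List.append_assoc]
      congr 2
      push_cast
      ring_nf

lemma pscCumLoop_foldl : ∀ (lines : List (List Char)) (acc : List Int) (t : Int),
    (lines.foldl pscCumLoop (acc, t)).1 = acc ++ pscCum t lines := by
  intro lines
  induction lines with
  | nil => intro acc t; simp [pscCum]
  | cons l rest ih =>
    intro acc t
    simp only [List.foldl_cons, pscCumLoop, PySem.List.len_eq, pscCum, ih]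
    simp

lemma pscCum_lt (lines : List (List Char)) : ∀ (t : Int), ∀ x ∈ pscCum t lines, t < x := by
  induction lines with
  | nil => intro t x hx; simp [pscCum] at hx
  | cons l rest ih =>
    intro t x hx
    simp only [pscCum, List.mem_cons] at hx
    rcases hx with h | h
    · omega
    · have := ih (t + ((l.length : Int) + 1)) x h; omega

lemma pscCum_pairwise (lines : List (List Char)) : ∀ (t : Int),
    (pscCum t lines).Pairwise (fun x1 x2 => x1 ≤ x2) := by
  induction lines with
  | nil => intro t; simp [pscCum]
  | cons l rest ih =>
    intro t
    simp only [pscCum]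
    refine List.Pairwise.cons ?_ (ih _)
    intro x hx
    have := pscCum_lt rest (t + ((l.length : Int) + 1)) x hx
    omega

lemma pscCum_length (lines : List (List Char)) : ∀ t, (pscCum t lines).length = lines.length := by
  induction lines with
  | nil => intro t; simp [pscCum]
  | cons l rest ih => intro t; simp [pscCum, ih]

lemma pscGreedy_eq_take (M : Int) : ∀ (lines : List (List Char)) (t : Int) (k : Nat),
    k ≤ lines.length →
    (∀ j (hj : j < lines.length), j < k → (pscCum t lines)[j]'(by rw [pscCum_length]; exact hj) ≤ M) →
    (∀ j (hj : j < lines.length), k ≤ j → M < (pscCum t lines)[j]'(by rw [pscCum_length]; exact hj)) →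
    pscGreedy (M - t) lines = ((lines.take k).map (· ++ ['\n'])).flatten := by
  intro lines
  induction lines with
  | nil => intro t k hk _ _; simp_all [pscGreedy]
  | cons l rest ih =>
    intro t k hk hle hgt
    match k with
    | 0 =>
      have h0 := hgt 0 (by simp) (by omega)
      simp only [pscCum, List.getElem_cons_zero] at h0
      simp only [pscGreedy, List.take_zero, List.map_nil, List.flatten_nil]
      rw [if_pos (by omega)]
    | (k' + 1) =>
      have h0 := hle 0 (by simp) (by omega)
      simp only [pscCum, List.getElem_cons_zero] at h0
      simp only [pscGreedy, List.take_succ_cons, List.map_cons, List.flatten_cons]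
      rw [if_neg (by omega)]
      congr 1
      have : M - t - ((l.length : Int) + 1) = M - (t + ((l.length : Int) + 1)) := by ring
      rw [this]
      apply ih (t + ((l.length : Int) + 1)) k' (by simpa using hk)
      · intro j hj hjk
        have := hle (j + 1) (by simpa using hj) (by omega)
        simpa [pscCum] using this
      · intro j hj hjk
        have := hgt (j + 1) (by simpa using hj) (by omega)
        simpa [pscCum] using this

lemma pscRstrip_newline (s : List Char) :
    PySem.Chars.rstrip (s ++ ['\n']) = PySem.Chars.rstrip s := by
  have h : PySem.Chars.isspace '\n' = true := by decide
  simp [PySem.Chars.rstrip, h]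

lemma pscLstrip_append (s t : List Char) :
    PySem.Chars.lstrip (s ++ t) =
      if PySem.Chars.lstrip s = [] then PySem.Chars.lstrip t else PySem.Chars.lstrip s ++ t := by
  induction s with
  | nil => simp [PySem.Chars.lstrip]
  | cons c s ih =>
    simp only [PySem.Chars.lstrip, List.cons_append, List.dropWhile] at *
    by_cases h : PySem.Chars.isspace c
    · simpa [h] using ih
    · simp [h]

lemma pscStrip_newline (s : List Char) :
    PySem.Chars.strip (s ++ ['\n']) = PySem.Chars.strip s := by
  simp only [PySem.Chars.strip]
  rw [pscLstrip_append]
  by_cases h : PySem.Chars.lstrip s = []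
  · rw [if_pos h, h, show PySem.Chars.lstrip ['\n'] = [] from by decide]
  · rw [if_neg h, pscRstrip_newline]

lemma pscFlatten_join (L : List (List Char)) :
    PySem.Chars.strip ((L.map (· ++ ['\n'])).flatten) =
      PySem.Chars.strip (PySem.Chars.join ['\n'] L) := by
  induction L with
  | nil => simp [PySem.Chars.join, List.intercalate]
  | cons l rest ih =>
    cases rest with
    | nil => simp [PySem.Chars.join, List.intercalate, pscStrip_newline]
    | cons l2 rest2 =>
      have hjoin : ∀ (L' : List (List Char)), L' ≠ [] →
          (L'.map (· ++ ['\n'])).flatten = PySem.Chars.join ['\n'] L' ++ ['\n'] := by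
        intro L'
        induction L' with
        | nil => intro h; exact absurd rfl h
        | cons a b ihb =>
          intro _
          cases b with
          | nil => simp [PySem.Chars.join, List.intercalate]
          | cons b1 b2 =>
            rw [List.map_cons, List.flatten_cons, ihb (by simp)]
            simp [PySem.Chars.join, List.intercalate]
      rw [hjoin _ (by simp), pscStrip_newline]

-- ===== VERDICT (by name: the statement is the Claim_ definition above) =====
theorem prepare_style_context_spec : Claim_equal_prepare_style_context := by
  intro note_text max_chars _
  unfold Spec_prepare_style_context prepare_style_context prepare_style_context_alt
  by_cases hlen : PySem.Str.len note_text ≤ max_chars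
  · rw [if_pos hlen, if_pos hlen]
  · rw [if_neg hlen, if_neg hlen]
    dsimp only
    set L := PySem.Chars.splitOn note_text.toList ['\n'] with hL
    have hcum : (L.foldl pscCumLoop ([], 0)).1 = pscCum 0 L := by
      simpa using pscCumLoop_foldl L [] 0
    rw [hcum]
    obtain ⟨hk, hle, hgt⟩ :=
      PySem.List.bisectRight_spec (pscCum 0 L) max_chars (pscCum_pairwise L 0)
    set k := PySem.List.bisectRight (pscCum 0 L) max_chars with hkdef
    have hk' : k ≤ L.length := by rwa [pscCum_length] at hk
    have hloop : pscLoopA max_chars [] L = pscGreedy max_chars L := by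
      simpa using pscLoopA_eq max_chars L []
    have hg : pscGreedy (max_chars - 0) L = ((L.take k).map (· ++ ['\n'])).flatten := by
      apply pscGreedy_eq_take max_chars L 0 k hk'
      · intro j hj hjk; exact hle j (by rw [pscCum_length]; exact hj) hjk
      · intro j hj hjk; exact hgt j (by rw [pscCum_length]; exact hj) hjk
    have hg' : pscGreedy max_chars L = ((L.take k).map (· ++ ['\n'])).flatten := by
      simpa using hg
    rw [hloop, hg', PySem.List.slice_to_natCast]
    exact congrArg String.ofList (pscFlatten_join (L.take k))
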